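-- pv_equiv track=rewrite | github.com/IrinaMilekhina/codesignal_practice | q_1.py | q_sol
-- ===== SOURCE A (Python) =====
-- from typing import List
--
-- def q_sol(arr: List[int]) -> List[int]:
--     result_arr = [0 for _ in range(len(arr))]
--     for i, el in enumerate(arr):
--         result_arr[i] = el
--         if i > 0:
--             result_arr[i] += arr[i - 1]
--         if i < len(arr)-1:
--             result_arr[i] += arr[i + 1]
--     return result_arr
-- ===== SOURCE B (Python) =====
-- from typing import List
--
-- def q_sol(arr: List[int]) -> List[int]:
--     n = len(arr)
--     P = [0]
--     for x in arr:
--         P.append(P[-1] + x)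
--     return [P[min(i + 2, n)] - P[max(i - 1, 0)] for i in range(n)]
-- ===== Notes on version B (the rewrite author's own statement) =====
-- stated objective: alternative
-- what changed: Replaces the per-element conditional neighbor reads with a prefix-sum array and computes each entry as a clamped-window difference P[min(i+2,n)] - P[max(i-1,0)].
import Mathlib
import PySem

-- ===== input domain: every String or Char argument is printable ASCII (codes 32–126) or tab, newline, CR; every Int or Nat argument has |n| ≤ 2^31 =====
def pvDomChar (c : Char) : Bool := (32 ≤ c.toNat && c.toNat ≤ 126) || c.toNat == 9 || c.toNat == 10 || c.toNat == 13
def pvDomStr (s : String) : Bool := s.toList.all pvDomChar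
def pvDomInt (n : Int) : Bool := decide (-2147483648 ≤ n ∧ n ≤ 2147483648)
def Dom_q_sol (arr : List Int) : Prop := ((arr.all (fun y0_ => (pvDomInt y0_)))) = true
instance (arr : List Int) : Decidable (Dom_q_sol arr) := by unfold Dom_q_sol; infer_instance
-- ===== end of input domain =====

-- B computes the same list via a prefix-sum array and window differences (alternative decomposition; same O(n) cost).

-- ===== PORT A =====
def q_sol (arr : List Int) : List Int :=
  let result0 := (PySem.List.pyRange 0 arr.length 1).map (fun _ => (0 : Int))
  (PySem.List.enumerate arr 0).foldl (fun res p =>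
    let v := p.2
    let v := if p.1 > 0 then v + PySem.List.pyGetD arr (p.1 - 1) 0 else v
    let v := if p.1 < (arr.length : Int) - 1 then v + PySem.List.pyGetD arr (p.1 + 1) 0 else v
    PySem.List.pySetD res p.1 v) result0

-- ===== PORT B =====
def q_sol_alt (arr : List Int) : List Int :=
  let n : Int := arr.length
  let P := arr.foldl (fun p x => p ++ [PySem.List.pyGetD p (-1) 0 + x]) [(0 : Int)]
  (PySem.List.pyRange 0 n 1).map (fun i =>
    PySem.List.pyGetD P (min (i + 2) n) 0 - PySem.List.pyGetD P (max (i - 1) 0) 0)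

-- ===== PRECONDITION & SPEC =====
def Spec_q_sol (arr : List Int) (out : List Int) : Prop := out = q_sol_alt arr
instance (arr : List Int) (out : List Int) : Decidable (Spec_q_sol arr out) := by unfold Spec_q_sol; infer_instance

-- ===== CLAIM (what is proved, stated in full; the proofs are below) =====
def Claim_equal_q_sol : Prop := ∀ (arr : List Int), Dom_q_sol arr → Spec_q_sol arr (q_sol arr)

-- ===== LEMMAS AND PROOFS =====

-- the value A stores at index j
def nbVal (arr : List Int) (j : Nat) : Int :=
  (if 0 < j then arr.getD j 0 + arr.getD (j - 1) 0 else arr.getD j 0)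
  + (if j + 1 < arr.length then arr.getD (j + 1) 0 else 0)

-- A's fold step
def stepA (arr : List Int) (res : List Int) (p : Int × Int) : List Int :=
  let v := p.2
  let v := if p.1 > 0 then v + PySem.List.pyGetD arr (p.1 - 1) 0 else v
  let v := if p.1 < (arr.length : Int) - 1 then v + PySem.List.pyGetD arr (p.1 + 1) 0 else v
  PySem.List.pySetD res p.1 v

lemma stepA_len (arr res : List Int) (p : Int × Int) : (stepA arr res p).length = res.length := by
  simp [stepA, PySem.List.length_pySetD]

lemma foldA_len (arr : List Int) (l : List (Int × Int)) (res : List Int) :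
    (l.foldl (stepA arr) res).length = res.length := by
  induction l generalizing res with
  | nil => rfl
  | cons p t ih => simp [List.foldl_cons, ih, stepA_len]

lemma foldA_untouched (arr : List Int) (l : List (Int × Int)) (res : List Int) (j : Nat)
    (h : ∀ p ∈ l, 0 ≤ p.1 ∧ p.1 ≠ (j : Int)) :
    (l.foldl (stepA arr) res)[j]? = res[j]? := by
  induction l generalizing res with
  | nil => rfl
  | cons p t ih =>
    have hp := h p (by simp)
    rw [List.foldl_cons, ih _ (fun q hq => h q (by simp [hq]))]
    show (PySem.List.pySetD res p.1 _)[j]? = res[j]?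
    obtain ⟨hp1, hp2⟩ := hp
    rw [PySem.List.pySetD_of_nonneg]
    · rw [List.getElem?_set]
      split
      · omega
      · rfl
    · exact hp1

def prefs (s : Int) : List Int → List Int
  | [] => []
  | x :: t => (s + x) :: prefs (s + x) t

def stepB (p : List Int) (x : Int) : List Int := p ++ [PySem.List.pyGetD p (-1) 0 + x]

lemma foldB (l : List Int) : ∀ (acc : List Int) (s : Int), acc ≠ [] →
    PySem.List.pyGetD acc (-1) 0 = s → l.foldl stepB acc = acc ++ prefs s l := by
  induction l with
  | nil => intro acc s _ _; simp [prefs]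
  | cons x t ih =>
    intro acc s hne hs
    rw [List.foldl_cons]
    show List.foldl stepB (stepB acc x) t = _
    have : stepB acc x = acc ++ [s + x] := by simp [stepB, hs]
    rw [this, ih (acc ++ [s + x]) (s + x) (by simp)
      (by rw [PySem.List.pyGetD_neg_one_append_singleton])]
    simp [prefs]

lemma prefs_get (l : List Int) : ∀ (s : Int) (k : Nat), k < l.length →
    (prefs s l)[k]? = some (s + (l.take (k + 1)).sum) := by
  induction l with
  | nil => intro s k h; simp at h
  | cons x t ih =>
    intro s k h
    cases k with
    | zero => simp [prefs]
    | succ k =>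
      have : k < t.length := by simpa using h
      simp [prefs, ih (s + x) k this, add_assoc]

-- the prefix-sum list B builds
lemma P_get (arr : List Int) (j : Nat) (hj : j ≤ arr.length) :
    (arr.foldl stepB [(0 : Int)])[j]? = some ((arr.take j).sum) := by
  rw [foldB arr [(0 : Int)] 0 (by simp) (by decide)]
  cases j with
  | zero => simp
  | succ k =>
    have hk : k < arr.length := by omega
    rw [List.singleton_append, List.getElem?_cons_succ, prefs_get arr 0 k hk]
    simp

lemma sum_take_diff (arr : List Int) (j : Nat) (hj : j < arr.length) :
    (arr.take (min (j + 2) arr.length)).sum - (arr.take (j - 1)).sum = nbVal arr j := by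
  have hgS : ∀ (k : Nat) (hk : k < arr.length), (arr.take (k + 1)).sum = (arr.take k).sum + arr[k]'hk :=
    fun k hk => List.sum_take_succ arr k hk
  have hget : ∀ k, (hk : k < arr.length) → arr.getD k 0 = arr[k] :=
    fun k hk => List.getD_eq_getElem arr 0 hk
  unfold nbVal
  by_cases h1 : 0 < j <;> by_cases h2 : j + 1 < arr.length <;> simp only [h1, h2, if_pos, if_false]
  · have hmin : min (j + 2) arr.length = j + 2 := by omega
    have e3 : (arr.take j).sum = (arr.take (j - 1)).sum + arr[j - 1]'(by omega) := by
      have := hgS (j - 1) (by omega)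
      rwa [show j - 1 + 1 = j from by omega] at this
    rw [hmin, hgS (j + 1) h2, hgS j hj, e3,
      hget j hj, hget (j - 1) (by omega), hget (j + 1) h2]
    ring
  · have hmin : min (j + 2) arr.length = j + 1 := by omega
    have e3 : (arr.take j).sum = (arr.take (j - 1)).sum + arr[j - 1]'(by omega) := by
      have := hgS (j - 1) (by omega)
      rwa [show j - 1 + 1 = j from by omega] at this
    rw [hmin, hgS j hj, e3, hget j hj, hget (j - 1) (by omega)]
    ring
  · have hj0 : j = 0 := by omega
    subst hj0
    have hmin : min (0 + 2) arr.length = 2 := by omega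
    rw [hmin, (by norm_num : (2 : Nat) = 1 + 1), hgS 1 h2, hgS 0 hj,
      hget 0 hj, hget 1 h2]
    simp
  · have hj0 : j = 0 := by omega
    subst hj0
    have hn : arr.length = 1 := by omega
    have hmin : min (0 + 2) arr.length = 1 := by omega
    rw [hmin, hgS 0 hj, hget 0 hj]
    simp

lemma B_get (arr : List Int) (j : Nat) (hj : j < arr.length) :
    (q_sol_alt arr)[j]? = some (nbVal arr j) := by
  unfold q_sol_alt
  rw [PySem.List.getElem?_map_pyRange_zero _ _ _ hj]
  have hmin : min ((j : Int) + 2) (arr.length : Int) = ((min (j + 2) arr.length : Nat) : Int) := by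
    push_cast; omega
  have hmax : max ((j : Int) - 1) 0 = ((j - 1 : Nat) : Int) := by
    omega
  rw [hmin, hmax, PySem.List.pyGetD_natCast, PySem.List.pyGetD_natCast]
  rw [show (fun (p : List Int) (x : Int) => p ++ [PySem.List.pyGetD p (-1) 0 + x]) = stepB from rfl]
  have h1 := P_get arr (min (j + 2) arr.length) (by omega)
  have h2 := P_get arr (j - 1) (by omega)
  rw [List.getD_eq_getElem?_getD, List.getD_eq_getElem?_getD, h1, h2]
  simp [sum_take_diff arr j hj]

lemma B_len (arr : List Int) : (q_sol_alt arr).length = arr.length := by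
  unfold q_sol_alt
  simp [PySem.List.length_pyRange_one]

lemma A_get (arr : List Int) (j : Nat) (hj : j < arr.length) :
    (q_sol arr)[j]? = some (nbVal arr j) := by
  unfold q_sol
  have hsplit : arr = arr.take j ++ arr[j] :: arr.drop (j + 1) := by
    conv_lhs => rw [← List.take_append_drop j arr]
    congr 1
    exact List.drop_eq_getElem_cons hj
  rw [show (PySem.List.enumerate arr 0) = PySem.List.enumerate (arr.take j ++ arr[j] :: arr.drop (j + 1)) 0 from by rw [← hsplit]]
  rw [PySem.List.enumerate_append, PySem.List.enumerate_cons, List.foldl_append, List.foldl_cons]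
  have hjt : (arr.take j).length = j := by simp [Nat.min_eq_left (le_of_lt hj)]
  set init := (PySem.List.pyRange 0 arr.length 1).map (fun _ => (0 : Int)) with hinit
  set res1 := (PySem.List.enumerate (arr.take j) 0).foldl (stepA arr) init with hres1
  have hres1' : (PySem.List.enumerate (arr.take j) 0).foldl (fun res p =>
      let v := p.2
      let v := if p.1 > 0 then v + PySem.List.pyGetD arr (p.1 - 1) 0 else v
      let v := if p.1 < (arr.length : Int) - 1 then v + PySem.List.pyGetD arr (p.1 + 1) 0 else v
      PySem.List.pySetD res p.1 v) init = res1 := rfl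
  rw [hres1']
  have hlen1 : res1.length = arr.length := by
    rw [hres1, foldA_len]
    simp [hinit, PySem.List.length_pyRange_one]
  have huntouched : ∀ (r : List Int),
      ((PySem.List.enumerate (arr.drop (j + 1)) (0 + (arr.take j).length + 1)).foldl (fun res p =>
      let v := p.2
      let v := if p.1 > 0 then v + PySem.List.pyGetD arr (p.1 - 1) 0 else v
      let v := if p.1 < (arr.length : Int) - 1 then v + PySem.List.pyGetD arr (p.1 + 1) 0 else v
      PySem.List.pySetD res p.1 v) r)[j]? = r[j]? := by
    intro r
    refine foldA_untouched arr _ r j ?_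
    intro p hp
    rcases (PySem.List.mem_enumerate_iff _ _ _).1 hp with ⟨k, hk, rfl⟩
    refine ⟨by positivity, by rw [hjt]; push_cast; omega⟩
  rw [huntouched]
  show (PySem.List.pySetD res1 (0 + (arr.take j).length) _)[j]? = _
  rw [hjt]
  have h0j : ((0 : Int) + (j : Int)) = (j : Nat) := by push_cast; ring
  rw [h0j, PySem.List.pySetD_natCast]
  rw [List.getElem?_set_eq_of_lt _ (by omega : j < res1.length)]
  congr 1
  show (if ((j : Int)) < (arr.length : Int) - 1
        then (if ((j : Int)) > 0 then arr[j] + PySem.List.pyGetD arr ((j : Int) - 1) 0 else arr[j])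
              + PySem.List.pyGetD arr ((j : Int) + 1) 0
        else (if ((j : Int)) > 0 then arr[j] + PySem.List.pyGetD arr ((j : Int) - 1) 0 else arr[j]))
      = nbVal arr j
  unfold nbVal
  by_cases h1 : 0 < j <;> by_cases h2 : j + 1 < arr.length
  · rw [if_pos (show ((j : Int)) < (arr.length : Int) - 1 by omega),
      if_pos (show ((j : Int)) > 0 by omega), if_pos h1, if_pos h2,
      show ((j : Int) - 1) = ((j - 1 : Nat) : Int) by omega,
      show ((j : Int) + 1) = ((j + 1 : Nat) : Int) by omega,
      PySem.List.pyGetD_natCast, PySem.List.pyGetD_natCast,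
      List.getD_eq_getElem arr 0 hj]
  · rw [if_neg (show ¬ ((j : Int)) < (arr.length : Int) - 1 by omega),
      if_pos (show ((j : Int)) > 0 by omega), if_pos h1, if_neg h2,
      show ((j : Int) - 1) = ((j - 1 : Nat) : Int) by omega,
      PySem.List.pyGetD_natCast, List.getD_eq_getElem arr 0 hj]
    ring
  · rw [if_pos (show ((j : Int)) < (arr.length : Int) - 1 by omega),
      if_neg (show ¬ ((j : Int)) > 0 by omega), if_neg h1, if_pos h2,
      show ((j : Int) + 1) = ((j + 1 : Nat) : Int) by omega,
      PySem.List.pyGetD_natCast, List.getD_eq_getElem arr 0 hj]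
  · rw [if_neg (show ¬ ((j : Int)) < (arr.length : Int) - 1 by omega),
      if_neg (show ¬ ((j : Int)) > 0 by omega), if_neg h1, if_neg h2,
      List.getD_eq_getElem arr 0 hj]
    ring

lemma A_len (arr : List Int) : (q_sol arr).length = arr.length := by
  unfold q_sol
  show ((PySem.List.enumerate arr 0).foldl (stepA arr)
    ((PySem.List.pyRange 0 arr.length 1).map (fun _ => (0 : Int)))).length = _
  rw [foldA_len]
  simp [PySem.List.length_pyRange_one]

-- ===== VERDICT (by name: the statement is the Claim_ definition above) =====
theorem q_sol_spec : Claim_equal_q_sol := by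
  intro arr _
  unfold Spec_q_sol
  apply List.ext_getElem?
  intro j
  by_cases hj : j < arr.length
  · rw [A_get arr j hj, B_get arr j hj]
  · rw [List.getElem?_eq_none, List.getElem?_eq_none]
    · rw [B_len]; omega
    · rw [A_len]; omega
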